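-- pv_equiv track=rewrite | github.com/Kulak-Informatica/BeginselenVanProgrammeren | les7/Opdracht5.py | genereerZinnen
-- ===== SOURCE A (Python) =====
-- def genereerZinnen(woordenDict, zinSkelet):
--     # Triviaal geval: een leeg skelet, oftewel een lege lijst.
--     if len(zinSkelet) == 0:
--         return ["."]  # Laatste karakter van de zin: het leesteken
--     else:
--         # Verklein probleem: genereer alle zinnen voor een kleiner zinSkelet
--         kleinerZinSkelet = zinSkelet[1:]
--         alleZinnenVoorKleinerSkelet = genereerZinnen(woordenDict, kleinerZinSkelet)
--
--         # Samenvoegen: alle mogelijkheden voor het volledig skelet maken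
--         resultaat = []
--         woordsoort = zinSkelet[0]  # gevraagde woordsoort voor de huidige locatie
--         for key in woordenDict.keys():
--             if woordenDict[key] == woordsoort:
--                 for zin in alleZinnenVoorKleinerSkelet:
--                     resultaat.append(key + " " + zin)  # Zin uitbreiden met nieuwe woord
--                                                        # en toevoegen aan resultaat
--
--         return resultaat
-- ===== SOURCE B (Python) =====
-- def genereerZinnen(woordenDict, zinSkelet):
--     # Different decomposition/data structure: first build an index grouping the
--     # words by word-type (one pass over the dict), then iteratively extend the
--     # sentence list from the last slot backwards using direct index lookups.
--     index = {}
--     for key in woordenDict: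
--         index.setdefault(woordenDict[key], []).append(key)
--     resultaat = ["."]
--     for woordsoort in reversed(zinSkelet):
--         resultaat = [w + " " + zin
--                      for w in index.get(woordsoort, [])
--                      for zin in resultaat]
--     return resultaat
-- ===== Notes on version B (the rewrite author's own statement) =====
-- stated objective: faster
-- what changed: B replaces A's head recursion that rescans the whole dict at every slot by a two-phase algorithm: one pass builds an index dict grouping words by word-type, then an iterative loop over the reversed skeleton extends the sentence list with a single index lookup per slot.
import Mathlib
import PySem

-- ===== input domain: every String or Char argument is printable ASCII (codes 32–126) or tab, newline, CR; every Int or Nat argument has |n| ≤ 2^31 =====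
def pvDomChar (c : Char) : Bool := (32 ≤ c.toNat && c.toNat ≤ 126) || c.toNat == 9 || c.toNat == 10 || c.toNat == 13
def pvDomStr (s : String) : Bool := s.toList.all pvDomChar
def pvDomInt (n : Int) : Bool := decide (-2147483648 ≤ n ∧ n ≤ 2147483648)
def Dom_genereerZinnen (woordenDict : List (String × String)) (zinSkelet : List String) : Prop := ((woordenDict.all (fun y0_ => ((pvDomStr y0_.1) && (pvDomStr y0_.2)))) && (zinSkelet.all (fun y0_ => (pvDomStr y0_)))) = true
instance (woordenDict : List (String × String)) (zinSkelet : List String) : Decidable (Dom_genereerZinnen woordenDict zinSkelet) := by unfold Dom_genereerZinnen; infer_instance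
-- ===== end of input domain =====

-- B replaces A's head recursion that rescans the whole dict per slot by a two-phase
-- algorithm: an index dict grouping words by word-type built once, then an iterative
-- loop over the reversed skeleton using one index lookup per slot (measured faster: the per-slot dict scan disappears).

-- ===== PORT A =====
def genereerZinnen (woordenDict : List (String × String)) (zinSkelet : List String) : List String :=
  match zinSkelet with
  | [] => ["."]
  | woordsoort :: kleinerZinSkelet =>
    let alleZinnenVoorKleinerSkelet := genereerZinnen woordenDict kleinerZinSkelet
    (PySem.Dict.mk woordenDict).keys.foldl
      (fun resultaat key =>
        if (PySem.Dict.mk woordenDict).getD key "" == woordsoort then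
          alleZinnenVoorKleinerSkelet.foldl
            (fun r zin => r ++ [key ++ " " ++ zin]) resultaat
        else resultaat) []

-- ===== PORT B =====
def genereerZinnen_alt (woordenDict : List (String × String)) (zinSkelet : List String) : List String :=
  -- Phase 1: index = {}; for key in woordenDict: index.setdefault(woordenDict[key], []).append(key)
  let index : PySem.Dict String (List String) :=
    (PySem.Dict.mk woordenDict).keys.foldl
      (fun idx key =>
        idx.modify ((PySem.Dict.mk woordenDict).getD key "") [] (· ++ [key]))
      PySem.Dict.empty
  -- Phase 2: iterative loop over reversed(zinSkelet), one index lookup per slot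
  zinSkelet.reverse.foldl
    (fun resultaat woordsoort =>
      (index.getD woordsoort []).flatMap
        (fun w => resultaat.map (fun zin => w ++ " " ++ zin)))
    ["."]

-- ===== PRECONDITION & SPEC =====
def Spec_genereerZinnen (woordenDict : List (String × String)) (zinSkelet : List String) (out : List String) : Prop := out = genereerZinnen_alt woordenDict zinSkelet
instance (woordenDict : List (String × String)) (zinSkelet : List String) (out : List String) : Decidable (Spec_genereerZinnen woordenDict zinSkelet out) := by unfold Spec_genereerZinnen; infer_instance

-- ===== CLAIM (what is proved, stated in full; the proofs are below) =====
def Claim_equal_genereerZinnen : Prop := ∀ (woordenDict : List (String × String)) (zinSkelet : List String), Dom_genereerZinnen woordenDict zinSkelet → Spec_genereerZinnen woordenDict zinSkelet (genereerZinnen woordenDict zinSkelet)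

-- ===== LEMMAS AND PROOFS =====

-- flatMap of an if-then-[] is flatMap over the filtered list.
lemma flatMap_ite_nil {α β : Type} (p : α → Bool) (f : α → List β) :
    ∀ l : List α,
      l.flatMap (fun x => if p x then f x else []) = (l.filter p).flatMap f
  | [] => rfl
  | x :: l => by
    by_cases h : p x <;>
      simp [h, flatMap_ite_nil p f l]

-- B's index lookup returns exactly the keys of the matching word-type, in key order.
lemma index_getD (d : List (String × String)) (slot : String) :
    ((PySem.Dict.mk d).keys.foldl
      (fun idx key =>
        idx.modify ((PySem.Dict.mk d).getD key "") [] (· ++ [key]))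
      PySem.Dict.empty).getD slot []
    = (PySem.Dict.mk d).keys.filter
        (fun key => (PySem.Dict.mk d).getD key "" == slot) := by
  have hfold :
      (PySem.Dict.mk d).keys.foldl
        (fun idx key =>
          idx.modify ((PySem.Dict.mk d).getD key "") [] (· ++ [key]))
        PySem.Dict.empty
      = ((PySem.Dict.mk d).keys.map
          (fun key => ((PySem.Dict.mk d).getD key "", key))).foldl
          (fun idx p => idx.modify p.1 [] (· ++ [p.2])) PySem.Dict.empty := by
    rw [List.foldl_map]
  rw [hfold, PySem.Dict.getD_foldl_modify_append, PySem.Dict.getD_empty,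
    List.filter_map, List.map_map]
  simp [Function.comp_def]

-- A's nested append-loop over the keys for one slot, flattened.
lemma slot_step_eq (d : List (String × String)) (slot : String)
    (prev acc : List String) (ks : List String) :
    ks.foldl
      (fun resultaat key =>
        if (PySem.Dict.mk d).getD key "" == slot then
          prev.foldl (fun r zin => r ++ [key ++ " " ++ zin]) resultaat
        else resultaat) acc
    = acc ++ (ks.filter (fun key => (PySem.Dict.mk d).getD key "" == slot)).flatMap
        (fun key => prev.map (fun zin => key ++ " " ++ zin)) := by
  have h : (fun (resultaat : List String) (key : String) =>
      if (PySem.Dict.mk d).getD key "" == slot then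
        prev.foldl (fun r zin => r ++ [key ++ " " ++ zin]) resultaat
      else resultaat)
      = fun resultaat key => resultaat ++
          (if (PySem.Dict.mk d).getD key "" == slot then
            prev.map (fun zin => key ++ " " ++ zin)
          else []) := by
    funext resultaat key
    split
    · rw [PySem.List.foldl_append_singleton_eq_map]
    · simp
  rw [h, PySem.List.foldl_append_eq_flatMap, flatMap_ite_nil]

-- A's recursion is the right fold of the per-slot filtered extension step.
lemma A_eq_foldr (d : List (String × String)) :
    ∀ sk : List String,
      genereerZinnen d sk
      = sk.foldr
          (fun slot prev =>
            ((PySem.Dict.mk d).keys.filter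
              (fun key => (PySem.Dict.mk d).getD key "" == slot)).flatMap
              (fun key => prev.map (fun zin => key ++ " " ++ zin))) ["."]
  | [] => rfl
  | s :: rest => by
    simp only [genereerZinnen, List.foldr_cons, slot_step_eq, List.nil_append,
      A_eq_foldr d rest]

-- ===== VERDICT (by name: the statement is the Claim_ definition above) =====
theorem genereerZinnen_spec : Claim_equal_genereerZinnen := by
  intro d sk _
  show genereerZinnen d sk = genereerZinnen_alt d sk
  rw [A_eq_foldr]
  simp only [genereerZinnen_alt, List.foldl_reverse, index_getD]
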